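-- pv_equiv track=rewrite | github.com/Kinjal001/Sudoku-Solver- | q.py | valid_list
-- ===== SOURCE A (Python) =====
-- from typing import Tuple, List
--
-- def valid_list(lst: List[int])-> bool:
-- 	"""This function takes a lists as an input and returns true if the given list is valid.
-- 	The list will be a single block , single row or single column only.
-- 	A valid list is defined as a list in which all non empty elements doesn't have a repeating element.
-- 	"""
-- 	# your code goes here
-- 	L=[]
-- 	q=0
-- 	if len(lst)==9:
-- 		for i in lst:
-- 			if i in range(0,10):
-- 				if i!=0:
-- 					L.append(lst.count(i))
-- 			else:
-- 				q=1
-- 				break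
-- 		if (L==[1]*len(L) or lst==[0]*9) and q!=1:
-- 				return True
-- 	return False
-- ===== SOURCE B (Python) =====
-- def valid_list(lst):
--     """Sort, then scan adjacent pairs: any duplicated non-zero value ends up adjacent."""
--     if len(lst) != 9:
--         return False
--     for x in lst:
--         if x not in range(0, 10):
--             return False
--     s = sorted(lst)
--     for a, b in zip(s, s[1:]):
--         if a != 0 and a == b:
--             return False
--     return True
-- ===== Notes on version B (the rewrite author's own statement) =====
-- stated objective: alternative
-- what changed: Replaces A's per-element lst.count scans collected into a list that is compared against a same-length list of ones (quadratic nested scanning) with a sort-then-adjacent-scan: after the length and range checks, sort the list once and reject if any adjacent pair is an equal non-zero value, which is correct because sorting makes all duplicates adjacent.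
import Mathlib
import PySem

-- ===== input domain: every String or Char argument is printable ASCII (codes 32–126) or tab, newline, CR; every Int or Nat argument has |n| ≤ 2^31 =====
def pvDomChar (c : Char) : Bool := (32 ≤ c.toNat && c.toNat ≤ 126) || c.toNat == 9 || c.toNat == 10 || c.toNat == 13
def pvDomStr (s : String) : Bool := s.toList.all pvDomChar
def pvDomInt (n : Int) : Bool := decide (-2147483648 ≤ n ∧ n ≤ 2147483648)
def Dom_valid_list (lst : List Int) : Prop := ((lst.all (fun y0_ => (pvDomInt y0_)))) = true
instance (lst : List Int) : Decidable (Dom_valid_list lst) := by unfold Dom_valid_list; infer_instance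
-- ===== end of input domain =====

-- B sorts the list once and rejects on an adjacent equal non-zero pair, instead of A's
-- per-element lst.count scans compared against [1]*len (objective: alternative algorithm).

-- ===== PORT A =====
-- A's for-loop with break: returns (L, q) — counts appended so far and the break flag.
def validLoopA (full : List Int) : List Int → (List Int × Int)
  | [] => ([], 0)
  | i :: rest =>
    if 0 ≤ i ∧ i ≤ 9 then          -- i in range(0,10)
      if i ≠ 0 then
        let p := validLoopA full rest
        (((full.count i : Nat) : Int) :: p.1, p.2)
      else validLoopA full rest
    else ([], 1)                    -- q = 1; break

def valid_list (lst : List Int) : Bool :=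
  if lst.length = 9 then
    let p := validLoopA lst lst
    if (p.1 = List.replicate p.1.length 1 ∨ lst = List.replicate 9 0) ∧ p.2 ≠ 1 then
      true
    else false
  else false

-- ===== PORT B =====
-- first for-loop of Source B: return False on any element outside range(0,10)
def rangeOkB : List Int → Bool
  | [] => true
  | x :: rest => if ¬ (0 ≤ x ∧ x ≤ 9) then false else rangeOkB rest

-- second for-loop of Source B: zip(s, s[1:]) pair scan over the sorted list
def adjOkB : List Int → Bool
  | [] => true
  | [_] => true
  | a :: b :: t => if a ≠ 0 ∧ a = b then false else adjOkB (b :: t)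

def valid_list_alt (lst : List Int) : Bool :=
  if lst.length ≠ 9 then false
  else if rangeOkB lst then
    adjOkB (PySem.List.sorted lst (fun x => x) false)
  else false

-- ===== PRECONDITION & SPEC =====
def Spec_valid_list (lst : List Int) (out : Bool) : Prop := out = valid_list_alt lst
instance (lst : List Int) (out : Bool) : Decidable (Spec_valid_list lst out) := by unfold Spec_valid_list; infer_instance

-- ===== CLAIM =====
def Claim_equal_valid_list : Prop := ∀ (lst : List Int), Dom_valid_list lst → Spec_valid_list lst (valid_list lst)

-- ===== LEMMAS AND PROOFS =====

-- Characterisation of A's loop: counts all 1 and no break iff every element is in range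
-- and every non-zero element occurs once in full.
lemma loopA_true_iff (full rest : List Int) :
    ((validLoopA full rest).1 = List.replicate (validLoopA full rest).1.length 1 ∧
      (validLoopA full rest).2 ≠ 1) ↔
    ((∀ x ∈ rest, 0 ≤ x ∧ x ≤ 9) ∧ ∀ x ∈ rest, x ≠ 0 → full.count x = 1) := by
  induction rest with
  | nil => simp [validLoopA]
  | cons i rest ih =>
    by_cases h : 0 ≤ i ∧ i ≤ 9
    · by_cases h0 : i = 0
      · subst h0
        simp only [validLoopA, List.mem_cons]
        rw [if_pos h, if_neg (by omega : ¬ ((0:Int) ≠ 0))]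
        constructor
        · intro hL
          obtain ⟨h1, h2⟩ := ih.mp hL
          constructor
          · intro x hx
            rcases hx with rfl | hx
            · exact h
            · exact h1 x hx
          · intro x hx hx0
            rcases hx with rfl | hx
            · exact absurd rfl hx0
            · exact h2 x hx hx0
        · intro ⟨h1, h2⟩
          exact ih.mpr ⟨fun x hx => h1 x (Or.inr hx), fun x hx hx0 => h2 x (Or.inr hx) hx0⟩
      · have hcast : (((full.count i : Nat) : Int) = 1) ↔ full.count i = 1 := by
          constructor <;> intro hh <;> omega
        simp only [validLoopA, List.mem_cons]
        rw [if_pos h, if_pos h0]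
        simp only [List.length_cons, List.replicate_succ, List.cons.injEq]
        constructor
        · rintro ⟨⟨hc, hL⟩, hq⟩
          obtain ⟨h1, h2⟩ := ih.mp ⟨hL, hq⟩
          constructor
          · intro x hx
            rcases hx with rfl | hx
            · exact h
            · exact h1 x hx
          · intro x hx hx0
            rcases hx with rfl | hx
            · exact hcast.mp hc
            · exact h2 x hx hx0
        · rintro ⟨h1, h2⟩
          obtain ⟨hL, hq⟩ := ih.mpr
            ⟨fun x hx => h1 x (Or.inr hx), fun x hx hx0 => h2 x (Or.inr hx) hx0⟩
          exact ⟨⟨hcast.mpr (h2 i (Or.inl rfl) h0), hL⟩, hq⟩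
    · simp only [validLoopA]
      rw [if_neg h]
      simp only [ne_eq, not_true_eq_false, and_false, false_iff, not_and]
      intro h1 _
      exact h (h1 i (List.mem_cons_self ..))

lemma rangeOkB_iff (rest : List Int) :
    rangeOkB rest = true ↔ (∀ x ∈ rest, 0 ≤ x ∧ x ≤ 9) := by
  induction rest with
  | nil => simp [rangeOkB]
  | cons x rest ih =>
    by_cases h : 0 ≤ x ∧ x ≤ 9
    · simp only [rangeOkB, if_neg (not_not_intro h), ih, List.mem_cons]
      constructor
      · intro h1 y hy
        rcases hy with rfl | hy
        · exact h
        · exact h1 y hy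
      · intro h1 y hy
        exact h1 y (Or.inr hy)
    · simp only [rangeOkB, if_pos h]
      simp only [Bool.false_eq_true, false_iff, not_forall]
      exact ⟨x, List.mem_cons_self .., h⟩

-- On a sorted list duplicates are adjacent: the adjacent-pair scan succeeds iff the
-- non-zero elements are pairwise distinct.
lemma adjOkB_iff (s : List Int) (hs : s.Pairwise (· ≤ ·)) :
    adjOkB s = true ↔ (s.filter (fun x => x ≠ 0)).Nodup := by
  induction s with
  | nil => simp [adjOkB]
  | cons a t ih =>
    cases t with
    | nil =>
      simp only [adjOkB, true_iff]
      exact (List.nodup_singleton a).filter _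
    | cons b t =>
      have hab : a ≤ b := (List.pairwise_cons.mp hs).1 b (List.mem_cons_self ..)
      have hs' : (b :: t).Pairwise (· ≤ ·) := (List.pairwise_cons.mp hs).2
      have hbt : ∀ x ∈ t, b ≤ x := (List.pairwise_cons.mp hs').1
      have hfilter : (a :: b :: t).filter (fun x => x ≠ 0)
          = if a = 0 then (b :: t).filter (fun x => x ≠ 0)
            else a :: (b :: t).filter (fun x => x ≠ 0) := by
        by_cases h0 : a = 0 <;> simp [List.filter_cons, h0]
      by_cases h0 : a = 0
      · have hA : adjOkB (a :: b :: t) = adjOkB (b :: t) := by simp [adjOkB, h0]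
        rw [hA, hfilter, if_pos h0]
        exact ih hs'
      · by_cases heq : a = b
        · have hA : adjOkB (a :: b :: t) = false := by subst heq; simp [adjOkB, h0]
          rw [hA, hfilter, if_neg h0]
          simp only [Bool.false_eq_true, false_iff]
          intro hnd
          have hmem : a ∈ (b :: t).filter (fun x => x ≠ 0) :=
            List.mem_filter.mpr ⟨List.mem_cons.mpr (Or.inl heq), by simpa using h0⟩
          exact (List.nodup_cons.mp hnd).1 hmem
        · have hA : adjOkB (a :: b :: t) = adjOkB (b :: t) := by simp [adjOkB, heq]
          rw [hA, hfilter, if_neg h0, List.nodup_cons, ih hs']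
          have hanot : a ∉ (b :: t).filter (fun x => x ≠ 0) := by
            intro hmem
            rcases List.mem_cons.mp (List.mem_filter.mp hmem).1 with rfl | hm
            · exact heq rfl
            · exact heq (le_antisymm hab (hbt a hm))
          exact ⟨fun h => ⟨hanot, h⟩, And.right⟩

-- A non-zero element occurs once in full iff it occurs once in the non-zero filter.
lemma count_filter_nonzero (full : List Int) (x : Int) (hx : x ≠ 0) :
    (full.filter (fun y => y ≠ 0)).count x = full.count x := by
  rw [List.count_filter]
  simp [hx]

lemma nodup_iff_counts (full : List Int) :
    (full.filter (fun x => x ≠ 0)).Nodup ↔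
      (∀ x ∈ full, x ≠ 0 → full.count x = 1) := by
  rw [List.nodup_iff_count_eq_one]
  constructor
  · intro h x hx hx0
    have := h x (List.mem_filter.mpr ⟨hx, by simpa using hx0⟩)
    rwa [count_filter_nonzero full x hx0] at this
  · intro h x hx
    have hx0 : x ≠ 0 := by simpa using (List.mem_filter.mp hx).2
    rw [count_filter_nonzero full x hx0]
    exact h x (List.mem_filter.mp hx).1 hx0

-- B's filter-nodup condition transfers from the sorted list back to lst.
lemma sorted_filter_nodup_iff (lst : List Int) :
    ((PySem.List.sorted lst (fun x => x) false).filter (fun x => x ≠ 0)).Nodup ↔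
      (lst.filter (fun x => x ≠ 0)).Nodup := by
  exact ((PySem.List.sorted_perm lst (fun x => x) false).filter _).nodup_iff

lemma zeros_case (lst : List Int) (h : lst = List.replicate 9 0) :
    valid_list lst = valid_list_alt lst := by
  subst h; decide

-- ===== VERDICT =====
theorem valid_list_spec : Claim_equal_valid_list := by
  intro lst _
  show valid_list lst = valid_list_alt lst
  by_cases hz : lst = List.replicate 9 0
  · exact zeros_case lst hz
  by_cases hlen : lst.length = 9
  · simp only [valid_list, valid_list_alt, if_pos hlen, if_neg (by simp [hlen] : ¬ lst.length ≠ 9)]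
    have hsrt := PySem.List.sorted_pairwise (xs := lst) (key := fun x => x)
    have hA := loopA_true_iff lst lst
    by_cases hc : ((validLoopA lst lst).1 = List.replicate (validLoopA lst lst).1.length 1 ∨
        lst = List.replicate 9 0) ∧ (validLoopA lst lst).2 ≠ 1
    · rw [if_pos hc]
      rcases hc with ⟨hL | hzz, hq⟩
      · have hprop := hA.mp ⟨hL, hq⟩
        rw [if_pos ((rangeOkB_iff lst).mpr hprop.1)]
        symm
        rw [adjOkB_iff _ hsrt, sorted_filter_nodup_iff, nodup_iff_counts]
        exact hprop.2
      · exact absurd hzz hz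
    · rw [if_neg hc]
      by_cases hr : rangeOkB lst = true
      · rw [if_pos hr]
        symm
        rw [Bool.eq_false_iff]
        intro hb
        rw [adjOkB_iff _ hsrt, sorted_filter_nodup_iff, nodup_iff_counts] at hb
        have h2 := hA.mpr ⟨(rangeOkB_iff lst).mp hr, hb⟩
        exact hc ⟨Or.inl h2.1, h2.2⟩
      · rw [if_neg hr]
  · simp [valid_list, valid_list_alt, hlen]
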